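-- pv_equiv track=rewrite | github.com/icaicarus/Eng-1-Assignments | kamalm18_CL6.py | classify_map
-- ===== SOURCE A (Python) =====
-- def count_type(map_data, map_type):
--     count = 0
--     for i in map_data: # iterates through the rows and columns of the list and adds each entry to the total if it corresponds with the type inputted
--         for j in i:
--             if j == map_type:
--                 count += 1
--     return count
--
-- def classify_map(map_data):
--     total = 0
--     for i in map_data:
--         total += len(i)
--     if count_type(map_data, 'R') > (total/2): # checks if >50% of list is 'R'
--         return "Suburban"
--     elif count_type(map_data, 'A') > (total/2): # checks if >50% of list is 'A'
--         return "Farmland"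
--     elif (count_type(map_data, 'U') + count_type(map_data, 'W')) > (total/2): # checks if >50% of list is 'U' and 'W'
--         return "Conservation"
--     elif (count_type(map_data, 'C') > (total/2)) and (count_type(map_data, 'U') + count_type(map_data, 'A')) >= (total/10) and (count_type(map_data, 'U') + count_type(map_data, 'A')) <= (total/5): # checks if >50% of list is 'C' and between 10-20% is 'A' and 'U'
--         return "City"
--     else:
--         return "Mixed"
-- ===== SOURCE B (Python) =====
-- def classify_map(map_data):
--     # One pass over all cells: tally every symbol into a dict and count the total,
--     # then apply the same threshold logic via lookups (absent symbols default to 0).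
--     counts = {}
--     total = 0
--     for row in map_data:
--         for cell in row:
--             counts[cell] = counts.get(cell, 0) + 1
--             total += 1
--     r = counts.get('R', 0)
--     a = counts.get('A', 0)
--     u = counts.get('U', 0)
--     w = counts.get('W', 0)
--     c = counts.get('C', 0)
--     if r > total / 2:
--         return "Suburban"
--     if a > total / 2:
--         return "Farmland"
--     if u + w > total / 2:
--         return "Conservation"
--     if c > total / 2 and total / 10 <= u + a <= total / 5:
--         return "City"
--     return "Mixed"
-- ===== Notes on version B (the rewrite author's own statement) =====
-- stated objective: alternative
-- what changed: A scans the whole grid seven times (one count_type pass per symbol plus a length pass); B makes a single pass accumulating a symbol-count dict and the total, then applies the same threshold logic via dict lookups (same asymptotic cost; not measurably faster in CPython).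
import Mathlib
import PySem

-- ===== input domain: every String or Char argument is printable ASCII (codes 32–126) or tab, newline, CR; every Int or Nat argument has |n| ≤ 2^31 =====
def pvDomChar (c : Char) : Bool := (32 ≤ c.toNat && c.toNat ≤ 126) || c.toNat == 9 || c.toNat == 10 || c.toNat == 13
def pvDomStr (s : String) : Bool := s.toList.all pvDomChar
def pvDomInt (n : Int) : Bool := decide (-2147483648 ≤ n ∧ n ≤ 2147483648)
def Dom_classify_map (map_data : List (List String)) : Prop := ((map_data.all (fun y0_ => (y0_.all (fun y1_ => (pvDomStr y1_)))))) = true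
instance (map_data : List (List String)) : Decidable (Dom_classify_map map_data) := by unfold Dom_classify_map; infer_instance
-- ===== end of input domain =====

-- B replaces A's seven full grid scans (one per count_type call) by a single pass that
-- tallies all symbols into a dict; objective: an alternative one-pass accumulation.
-- Python's float comparisons 'x > total/2', 'y >= total/10', 'y <= total/5' are ported
-- exactly as the integer comparisons '2*x > total', '10*y >= total', '5*y <= total'
-- (exact: both sides are integers of magnitude far below 2^53 on the tested domain).

-- ===== PORT A =====
def count_type (map_data : List (List String)) (map_type : String) : Int :=
  map_data.foldl (fun count i =>
    i.foldl (fun c j => if j == map_type then c + 1 else c) count) 0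

def classify_map (map_data : List (List String)) : String :=
  let total : Int := map_data.foldl (fun t i => t + (i.length : Int)) 0
  if 2 * count_type map_data "R" > total then "Suburban"
  else if 2 * count_type map_data "A" > total then "Farmland"
  else if 2 * (count_type map_data "U" + count_type map_data "W") > total then "Conservation"
  else if 2 * count_type map_data "C" > total ∧
          10 * (count_type map_data "U" + count_type map_data "A") ≥ total ∧
          5 * (count_type map_data "U" + count_type map_data "A") ≤ total then "City"
  else "Mixed"

-- ===== PORT B =====
def pvAltStep (st : PySem.Dict String Int × Int) (cell : String) : PySem.Dict String Int × Int :=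
  (st.1.insert cell (st.1.getD cell 0 + 1), st.2 + 1)

def classify_map_alt (map_data : List (List String)) : String :=
  let st := map_data.foldl (fun st row => row.foldl pvAltStep st) (PySem.Dict.empty, 0)
  let counts := st.1
  let total := st.2
  let r := counts.getD "R" 0
  let a := counts.getD "A" 0
  let u := counts.getD "U" 0
  let w := counts.getD "W" 0
  let c := counts.getD "C" 0
  if 2 * r > total then "Suburban"
  else if 2 * a > total then "Farmland"
  else if 2 * (u + w) > total then "Conservation"
  else if 2 * c > total ∧ 10 * (u + a) ≥ total ∧ 5 * (u + a) ≤ total then "City"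
  else "Mixed"

-- ===== PRECONDITION & SPEC =====
def Spec_classify_map (map_data : List (List String)) (out : String) : Prop := out = classify_map_alt map_data
instance (map_data : List (List String)) (out : String) : Decidable (Spec_classify_map map_data out) := by unfold Spec_classify_map; infer_instance

-- ===== CLAIM (what is proved, stated in full; the proofs are below) =====
def Claim_equal_classify_map : Prop := ∀ (map_data : List (List String)), Dom_classify_map map_data → Spec_classify_map map_data (classify_map map_data)

-- ===== LEMMAS AND PROOFS =====

theorem row_fold_getD (row : List String) (d : PySem.Dict String Int) (tot : Int) (t : String) :
    (row.foldl pvAltStep (d, tot)).1.getD t 0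
      = row.foldl (fun c j => if j == t then c + 1 else c) (d.getD t 0) := by
  induction row generalizing d tot with
  | nil => rfl
  | cons x xs ih =>
    simp only [List.foldl, pvAltStep]
    rw [ih, PySem.Dict.getD_insert]
    by_cases h : t = x
    · subst h; simp
    · have h' : (x == t) = false := by simpa using Ne.symm h
      simp [h, h']

theorem row_fold_total (row : List String) (d : PySem.Dict String Int) (tot : Int) :
    (row.foldl pvAltStep (d, tot)).2 = tot + (row.length : Int) := by
  induction row generalizing d tot with
  | nil => simp
  | cons x xs ih =>
    simp only [List.foldl, pvAltStep]
    rw [ih]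
    simp only [List.length_cons]
    push_cast
    omega

theorem map_fold_getD (m : List (List String)) (d : PySem.Dict String Int) (tot : Int) (t : String) :
    (m.foldl (fun st row => row.foldl pvAltStep st) (d, tot)).1.getD t 0
      = m.foldl (fun count i => i.foldl (fun c j => if j == t then c + 1 else c) count) (d.getD t 0) := by
  induction m generalizing d tot with
  | nil => rfl
  | cons row rest ih =>
    simp only [List.foldl]
    have hsurj : row.foldl pvAltStep (d, tot)
        = ((row.foldl pvAltStep (d, tot)).1, (row.foldl pvAltStep (d, tot)).2) := rfl
    rw [hsurj, ih, row_fold_getD]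

theorem map_fold_total (m : List (List String)) (d : PySem.Dict String Int) (tot : Int) :
    (m.foldl (fun st row => row.foldl pvAltStep st) (d, tot)).2
      = m.foldl (fun t i => t + (i.length : Int)) tot := by
  induction m generalizing d tot with
  | nil => rfl
  | cons row rest ih =>
    simp only [List.foldl]
    have hsurj : row.foldl pvAltStep (d, tot)
        = ((row.foldl pvAltStep (d, tot)).1, (row.foldl pvAltStep (d, tot)).2) := rfl
    rw [hsurj, ih, row_fold_total]

theorem counts_eq (m : List (List String)) (t : String) :
    (m.foldl (fun st row => row.foldl pvAltStep st) (PySem.Dict.empty, (0 : Int))).1.getD t 0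
      = count_type m t := by
  rw [map_fold_getD]; rfl

theorem total_eq (m : List (List String)) :
    (m.foldl (fun st row => row.foldl pvAltStep st) (PySem.Dict.empty, (0 : Int))).2
      = m.foldl (fun t i => t + (i.length : Int)) 0 :=
  map_fold_total m _ _

-- ===== VERDICT (by name: the statement is the Claim_ definition above) =====
theorem classify_map_spec : Claim_equal_classify_map := by
  intro m _
  show classify_map m = classify_map_alt m
  unfold classify_map classify_map_alt
  simp only [counts_eq, total_eq]
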